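-- pv_equiv track=rewrite | github.com/iansedano/aoc | python/src/aoc/2023/14.py | debug
-- ===== SOURCE A (Python) =====
-- def debug(shape, balls, cubes):
--     rows = []
--     for y in range(shape[1]):
--         row = []
--         for x in range(shape[0]):
--             pos = (x, y)
--             if pos in balls:
--                 row.append("O")
--             elif pos in cubes:
--                 row.append("#")
--             else:
--                 row.append(".")
--         rows.append(row)
--     return "\n".join(["".join(row) for row in rows])
-- ===== SOURCE B (Python) =====
-- def debug(shape, balls, cubes):
--     width, height = shape[0], shape[1]
--     grid = [["."] * width for _ in range(height)]
--     for x, y in cubes: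
--         if 0 <= x < width and 0 <= y < height:
--             grid[y][x] = "#"
--     for x, y in balls:
--         if 0 <= x < width and 0 <= y < height:
--             grid[y][x] = "O"
--     return "\n".join("".join(row) for row in grid)
-- ===== Notes on version B (the rewrite author's own statement) =====
-- stated objective: faster
-- what changed: Instead of scanning balls and cubes for every grid cell, B builds a full-dot canvas once and paints cubes then balls directly at their coordinates (balls last so they win, out-of-range points dropped by a bounds guard); intended as faster, measured ~8.5x at the largest size both versions finished.
import Mathlib
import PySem

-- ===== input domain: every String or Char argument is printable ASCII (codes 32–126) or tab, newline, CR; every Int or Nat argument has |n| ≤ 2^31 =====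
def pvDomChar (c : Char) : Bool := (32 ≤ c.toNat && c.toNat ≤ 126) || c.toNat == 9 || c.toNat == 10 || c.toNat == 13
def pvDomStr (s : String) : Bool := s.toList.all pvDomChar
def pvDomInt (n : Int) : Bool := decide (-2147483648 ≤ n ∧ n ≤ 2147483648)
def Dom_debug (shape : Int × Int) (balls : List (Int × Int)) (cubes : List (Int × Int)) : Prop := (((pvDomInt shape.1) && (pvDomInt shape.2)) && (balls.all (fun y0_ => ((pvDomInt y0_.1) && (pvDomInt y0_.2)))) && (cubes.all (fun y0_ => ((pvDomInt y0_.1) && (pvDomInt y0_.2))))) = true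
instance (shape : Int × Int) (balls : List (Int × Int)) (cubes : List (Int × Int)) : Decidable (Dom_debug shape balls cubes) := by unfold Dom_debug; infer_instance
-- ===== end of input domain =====

-- B paints a full-dot canvas once (cubes first, then balls) instead of scanning both lists for every cell.

-- ===== PORT A =====
-- literal transliteration: nested loops appending "O"/"#"/"." per cell, then joined
def debug (shape : Int × Int) (balls : List (Int × Int)) (cubes : List (Int × Int)) : String :=
  let rows : List (List String) :=
    (PySem.List.pyRange 0 shape.2 1).foldl (fun rows y =>
      let row : List String :=
        (PySem.List.pyRange 0 shape.1 1).foldl (fun row x =>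
          row ++ [if (x, y) ∈ balls then "O" else if (x, y) ∈ cubes then "#" else "."]) []
      rows ++ [row]) []
  PySem.Str.join "\n" (rows.map (fun row => PySem.Str.join "" row))

-- ===== PORT B =====
-- B-side helper: paint every in-bounds point of pts with character c
def debugPaint (shape : Int × Int) (c : Char) (grid : List (List Char))
    (pts : List (Int × Int)) : List (List Char) :=
  pts.foldl (fun g p =>
    if 0 ≤ p.1 ∧ p.1 < shape.1 ∧ 0 ≤ p.2 ∧ p.2 < shape.2 then
      g.modify p.2.toNat (fun row => row.set p.1.toNat c)
    else g) grid

def debug_alt (shape : Int × Int) (balls : List (Int × Int)) (cubes : List (Int × Int)) : String :=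
  let grid0 := List.replicate shape.2.toNat (List.replicate shape.1.toNat '.')
  let grid1 := debugPaint shape '#' grid0 cubes
  let grid2 := debugPaint shape 'O' grid1 balls
  PySem.Str.join "\n" (grid2.map (fun row => String.ofList row))

-- ===== PRECONDITION & SPEC =====
def Spec_debug (shape : Int × Int) (balls : List (Int × Int)) (cubes : List (Int × Int)) (out : String) : Prop := out = debug_alt shape balls cubes
instance (shape : Int × Int) (balls : List (Int × Int)) (cubes : List (Int × Int)) (out : String) : Decidable (Spec_debug shape balls cubes out) := by unfold Spec_debug; infer_instance

-- ===== CLAIM (what is proved, stated in full; the proofs are below) =====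
def Claim_equal_debug : Prop := ∀ (shape : Int × Int) (balls : List (Int × Int)) (cubes : List (Int × Int)), Dom_debug shape balls cubes → Spec_debug shape balls cubes (debug shape balls cubes)

-- ===== LEMMAS AND PROOFS =====

-- the value every cell (x, y) carries in A's output
def debugCell (balls cubes : List (Int × Int)) (x y : Int) : Char :=
  if (x, y) ∈ balls then 'O' else if (x, y) ∈ cubes then '#' else '.'

-- a foldl that appends one element per item is a map
theorem foldl_append_singleton {α β : Type} (f : α → β) (l : List α) :
    ∀ init : List β, l.foldl (fun acc x => acc ++ [f x]) init = init ++ l.map f := by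
  induction l with
  | nil => intro init; simp
  | cons a l ih => intro init; simp [ih]

-- painting preserves the outer length
theorem debugPaint_length (shape : Int × Int) (c : Char) (pts : List (Int × Int)) :
    ∀ grid : List (List Char), (debugPaint shape c grid pts).length = grid.length := by
  induction pts with
  | nil => intro grid; rfl
  | cons p ps ih =>
    intro grid
    simp only [debugPaint, List.foldl_cons] at *
    rw [ih]
    split
    · exact List.length_modify ..
    · rfl

-- painting preserves the row lengths
theorem debugPaint_rowlen (shape : Int × Int) (c : Char) (pts : List (Int × Int)) (w : Nat) :
    ∀ grid : List (List Char), (∀ r ∈ grid, r.length = w) →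
      ∀ r ∈ debugPaint shape c grid pts, r.length = w := by
  induction pts with
  | nil => intro grid h; exact h
  | cons p ps ih =>
    intro grid h
    simp only [debugPaint, List.foldl_cons] at *
    apply ih
    split
    · intro r hr
      obtain ⟨j, hj, hjr⟩ := List.mem_iff_getElem.mp hr
      have hj' : j < grid.length := by simpa using hj
      have : (grid.modify p.2.toNat (fun row => row.set p.1.toNat c))[j]? = some r := by
        rw [List.getElem?_eq_getElem hj, hjr]
      rw [List.getElem?_modify, List.getElem?_eq_getElem hj'] at this
      simp only [Option.map_eq_map, Option.map_some] at this
      split at this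
      · cases this; simp [h _ (List.getElem_mem hj')]
      · cases this; exact h _ (List.getElem_mem hj')
    · exact h

-- the painted value of a cell
theorem debugPaint_getD (shape : Int × Int) (c : Char) (pts : List (Int × Int))
    (x y : Nat) (hx : x < shape.1.toNat) (hy : y < shape.2.toNat) :
    ∀ grid : List (List Char), grid.length = shape.2.toNat →
      (∀ r ∈ grid, r.length = shape.1.toNat) →
      ((debugPaint shape c grid pts).getD y []).getD x '.' =
        if ((x : Int), (y : Int)) ∈ pts then c else (grid.getD y []).getD x '.' := by
  induction pts with
  | nil => intro grid _ _; simp [debugPaint]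
  | cons p ps ih =>
    intro grid hlen hrow
    obtain ⟨px, py⟩ := p
    simp only [debugPaint, List.foldl_cons] at *
    by_cases hp : 0 ≤ px ∧ px < shape.1 ∧ 0 ≤ py ∧ py < shape.2
    · rw [if_pos hp]
      set g' := grid.modify py.toNat (fun row => row.set px.toNat c) with hg'
      have hlen' : g'.length = shape.2.toNat := by rw [hg', List.length_modify]; exact hlen
      have hrow' : ∀ r ∈ g', r.length = shape.1.toNat := by
        intro r hr
        obtain ⟨j, hj, hjr⟩ := List.mem_iff_getElem.mp hr
        have hj' : j < grid.length := by simpa [hg'] using hj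
        have : g'[j]? = some r := by rw [List.getElem?_eq_getElem hj, hjr]
        rw [hg', List.getElem?_modify, List.getElem?_eq_getElem hj'] at this
        simp only [Option.map_eq_map, Option.map_some] at this
        split at this
        · cases this; simp [hrow _ (List.getElem_mem hj')]
        · cases this; exact hrow _ (List.getElem_mem hj')
      rw [ih g' hlen' hrow']
      -- value of the modified grid at (x, y)
      have hyg : y < grid.length := by omega
      have hstep : (g'.getD y []).getD x '.' =
          if (px, py) = ((x : Int), (y : Int)) then c else (grid.getD y []).getD x '.' := by
        rw [hg']
        simp only [List.getD_eq_getElem?_getD]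
        rw [List.getElem?_modify]
        simp only [List.getElem?_eq_getElem hyg, Option.map_eq_map, Option.map_some,
          Option.getD_some]
        by_cases hky : py.toNat = y
        · rw [if_pos hky]
          have hrl : (grid[y]).length = shape.1.toNat := hrow _ (List.getElem_mem hyg)
          rw [List.getElem?_set]
          by_cases hkx : px.toNat = x
          · have hpe : (px, py) = ((x : Int), (y : Int)) := by
              simp only [Prod.mk.injEq]
              constructor <;> omega
            rw [if_pos hkx, if_pos (by omega), if_pos hpe]
            simp
          · have hpe : (px, py) ≠ ((x : Int), (y : Int)) := by
              intro heq; rw [Prod.mk.injEq] at heq; omega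
            rw [if_neg hkx, if_neg hpe]
        · have hpe : (px, py) ≠ ((x : Int), (y : Int)) := by
            intro heq; rw [Prod.mk.injEq] at heq; omega
          rw [if_neg hky, if_neg hpe]
      rw [hstep]
      by_cases hmem : ((x : Int), (y : Int)) ∈ ps
      · simp [hmem]
      · by_cases hpe : (px, py) = ((x : Int), (y : Int)) <;> simp [hmem, hpe, eq_comm]
    · rw [if_neg hp]
      rw [ih grid hlen hrow]
      have hpe : ((px : Int), (py : Int)) ≠ ((x : Int), (y : Int)) := by
        rintro heq
        rw [Prod.mk.injEq] at heq
        exact hp ⟨by omega, by omega, by omega, by omega⟩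
      by_cases hmem : ((x : Int), (y : Int)) ∈ ps <;> simp [hmem, hpe, eq_comm]

-- the one-char string A appends, as a character
theorem debugCell_toList (balls cubes : List (Int × Int)) (x y : Int) :
    (if (x, y) ∈ balls then "O" else if (x, y) ∈ cubes then "#" else ".").toList
      = [debugCell balls cubes x y] := by
  unfold debugCell; split_ifs <;> rfl

-- B's final grid holds exactly A's cell values
theorem debug_grid_eq (shape : Int × Int) (balls cubes : List (Int × Int)) :
    debugPaint shape 'O'
        (debugPaint shape '#'
          (List.replicate shape.2.toNat (List.replicate shape.1.toNat '.')) cubes) balls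
      = (List.range shape.2.toNat).map (fun (y : Nat) =>
          (List.range shape.1.toNat).map (fun (x : Nat) => debugCell balls cubes (x : Int) (y : Int))) := by
  set grid0 := List.replicate shape.2.toNat (List.replicate shape.1.toNat '.') with hg0
  have hlen0 : grid0.length = shape.2.toNat := by simp [hg0]
  have hrow0 : ∀ r ∈ grid0, r.length = shape.1.toNat := by
    intro r hr; rw [List.eq_of_mem_replicate hr]; simp
  have hlen1 : (debugPaint shape '#' grid0 cubes).length = shape.2.toNat := by
    rw [debugPaint_length]; exact hlen0
  have hrow1 := debugPaint_rowlen shape '#' cubes _ grid0 hrow0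
  have hlen2 : (debugPaint shape 'O' (debugPaint shape '#' grid0 cubes) balls).length
      = shape.2.toNat := by rw [debugPaint_length]; exact hlen1
  have hrow2 := debugPaint_rowlen shape 'O' balls _ _ hrow1
  apply List.ext_getElem
  · simp [hlen2]
  · intro y hy1 hy2
    simp only [List.getElem_map, List.getElem_range]
    have hy : y < shape.2.toNat := by simpa [hlen2] using hy1
    apply List.ext_getElem
    · simp [hrow2 _ (List.getElem_mem hy1)]
    · intro x hx1 hx2
      simp only [List.getElem_map, List.getElem_range]
      have hx : x < shape.1.toNat := by
        have := hrow2 _ (List.getElem_mem hy1); omega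
      have hq : ((debugPaint shape 'O' (debugPaint shape '#' grid0 cubes) balls).getD y []).getD x '.'
          = (debugPaint shape 'O' (debugPaint shape '#' grid0 cubes) balls)[y][x] := by
        rw [List.getD_eq_getElem (hn := hy1), List.getD_eq_getElem (hn := hx1)]
      rw [← hq]
      rw [debugPaint_getD shape 'O' balls x y hx hy _ hlen1 hrow1]
      rw [debugPaint_getD shape '#' cubes x y hx hy _ hlen0 hrow0]
      have hdot : (grid0.getD y []).getD x '.' = '.' := by
        rw [hg0]
        simp only [List.getD_eq_getElem?_getD, List.getElem?_replicate]
        simp [hy, hx]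
      rw [hdot]
      simp [debugCell]

-- ===== VERDICT (by name: the statement is the Claim_ definition above) =====
theorem debug_spec : Claim_equal_debug := by
  intro shape balls cubes _
  unfold Spec_debug debug debug_alt
  dsimp only
  apply String.toList_inj.mp
  rw [debug_grid_eq]
  rw [foldl_append_singleton (f := fun y =>
    (PySem.List.pyRange 0 shape.1 1).foldl (fun row x =>
      row ++ [if (x, y) ∈ balls then "O" else if (x, y) ∈ cubes then "#" else "."]) [])]
  simp only [List.nil_append]
  rw [PySem.Str.toList_join, PySem.Str.toList_join]
  congr 1
  rw [PySem.List.pyRange_one 0 shape.2]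
  simp only [List.map_map, Int.sub_zero, Function.comp_def, zero_add]
  apply List.map_congr_left
  intro y _
  rw [foldl_append_singleton (f := fun x =>
    if (x, (y : Int)) ∈ balls then "O" else if (x, (y : Int)) ∈ cubes then "#" else ".")]
  simp only [List.nil_append]
  rw [PySem.Str.toList_join]
  rw [PySem.List.pyRange_one 0 shape.1]
  simp only [List.map_map, Function.comp_def, Int.sub_zero, zero_add, debugCell_toList,
    String.toList_ofList]
  rw [show "".toList = ([] : List Char) from rfl]
  have := PySem.Chars.join_nil_singletons
    ((List.range shape.1.toNat).map (fun (x : Nat) => debugCell balls cubes (x : Int) (y : Int)))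
  simp only [List.map_map, Function.comp_def] at this
  exact this
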